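-- pv_equiv track=rewrite | github.com/kimzeze/Programmers-python | 프로그래머스/0/181851. 전국 대회 선발 고사/전국 대회 선발 고사.py | solution
-- ===== SOURCE A (Python) =====
-- def solution(rank, attendance):
--     group = {}
--     length = len(rank)
--
--     for index, student in enumerate(rank):
--         group[index] = [student]
--
--
--     for i in range(len(attendance)):
--         if attendance[i] == False:
--             del group[i]
--
--     sorted_group = sorted(group.items(), key=lambda x: x[1])
--
--     a, b, c = sorted_group[0][0], sorted_group[1][0], sorted_group[2][0]
--
--     return 10000 * a + 100 * b + c
-- ===== SOURCE B (Python) =====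
-- def solution(rank, attendance):
--     # attendees as (rank, index) pairs; a student without an attendance entry counts as attending (as in A)
--     pairs = [(r, i) for i, r in enumerate(rank)
--              if i >= len(attendance) or attendance[i]]
--     total = 0
--     for weight in (10000, 100, 1):
--         best = min(pairs)
--         pairs.remove(best)
--         total += weight * best[1]
--     return total
-- ===== Notes on version B (the rewrite author's own statement) =====
-- stated objective: faster
-- what changed: Replaces A's index-keyed dict build, deletion loop and full sort of all attendees by a single filtered (rank, index) comprehension followed by three repeated minimum extractions (partial selection instead of sorting).
import Mathlib
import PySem

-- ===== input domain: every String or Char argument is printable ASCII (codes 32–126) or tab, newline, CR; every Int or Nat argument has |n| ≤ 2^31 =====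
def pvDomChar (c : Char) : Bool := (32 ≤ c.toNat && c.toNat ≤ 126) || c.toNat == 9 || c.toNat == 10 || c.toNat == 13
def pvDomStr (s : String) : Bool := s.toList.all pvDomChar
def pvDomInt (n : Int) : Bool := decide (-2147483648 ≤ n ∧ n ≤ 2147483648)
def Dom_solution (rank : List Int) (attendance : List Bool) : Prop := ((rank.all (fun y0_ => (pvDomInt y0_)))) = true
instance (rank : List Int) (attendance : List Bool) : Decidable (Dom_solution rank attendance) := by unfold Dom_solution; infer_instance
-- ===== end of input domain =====

-- B replaces A's dict-build / delete-loop / full sort by a filtered comprehension and three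
-- repeated minimum extractions: selection of the three smallest instead of sorting (faster; the
-- timing run measured it).

-- ===== PORT A =====
-- dict values are the singleton lists [student]; Python compares them lexicographically, which on
-- List Int is the port's `<` on List Int (exact here: all compared lists are int singletons).
def solution (rank : List Int) (attendance : List Bool) : Int :=
  let group0 : PySem.Dict Int (List Int) :=
    (PySem.List.enumerate rank).foldl (fun g p => g.insert p.1 [p.2]) PySem.Dict.empty
  -- `del group[i]`: KeyError (i not a key) is excluded by Pre_solution; there `erase` is exact
  let group := (PySem.List.pyRange 0 (attendance.length : Int) 1).foldl
      (fun g i => if PySem.List.pyGetD attendance i true == false then g.erase i else g) group0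
  let sorted_group := PySem.List.sorted group.items (fun x => x.2) false
  -- sorted_group[0/1/2]: IndexError (fewer than 3 attendees) is excluded by Pre_solution
  match PySem.List.pyGet? sorted_group 0, PySem.List.pyGet? sorted_group 1,
        PySem.List.pyGet? sorted_group 2 with
  | some a, some b, some c => 10000 * a.1 + 100 * b.1 + c.1
  | _, _, _ => 0

-- ===== PORT B =====
-- min(pairs) on int pairs is Python's lexicographic tuple minimum = min2? with keys fst, snd (exact);
-- min/remove on an empty pairs list (fewer than 3 attendees) raises in Python, excluded by Pre_solution
def solution_alt (rank : List Int) (attendance : List Bool) : Int :=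
  let pairs := ((PySem.List.enumerate rank).filter
      (fun p => decide ((attendance.length : Int) ≤ p.1) || PySem.List.pyGetD attendance p.1 false)).map
      (fun p => (p.2, p.1))
  let step := fun (st : List (Int × Int) × Int) (w : Int) =>
    match PySem.List.min2? st.1 (fun x => x.1) (fun x => x.2) with
    | none => st
    | some best =>
      match PySem.List.remove? st.1 best with
      | none => st
      | some rest => (rest, st.2 + w * best.2)
  (([10000, 100, 1] : List Int).foldl step (pairs, 0)).2

-- ===== PRECONDITION & SPEC =====
-- Pre_ excludes exactly the inputs where the Python A raises: a False attendance entry whose index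
-- is not a student index (KeyError on `del group[i]`), and fewer than three attending students
-- (IndexError on `sorted_group[2]`).
def Pre_solution (rank : List Int) (attendance : List Bool) : Prop :=
  (∀ i : Nat, i < attendance.length → attendance.getD i true = false → i < rank.length) ∧
  3 ≤ ((PySem.List.pyRange 0 (rank.length : Int) 1).filter
        (fun i => decide ((attendance.length : Int) ≤ i) || PySem.List.pyGetD attendance i false)).length
instance (rank : List Int) (attendance : List Bool) : Decidable (Pre_solution rank attendance) := by
  unfold Pre_solution; infer_instance
def pvWitness_solution : List Int × List Bool := ([3, 1, 2], [true, true, true])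

def Spec_solution (rank : List Int) (attendance : List Bool) (out : Int) : Prop := out = solution_alt rank attendance
instance (rank : List Int) (attendance : List Bool) (out : Int) : Decidable (Spec_solution rank attendance out) := by unfold Spec_solution; infer_instance

-- ===== CLAIM (what is proved, stated in full; the proofs are below) =====
def Claim_equal_solution : Prop := ∀ (rank : List Int) (attendance : List Bool), Dom_solution rank attendance → Pre_solution rank attendance → Spec_solution rank attendance (solution rank attendance)

-- ===== LEMMAS AND PROOFS =====

-- the strict lexicographic order on (rank, index) pairs: the order in which A's stable sort and
-- B's repeated minima both enumerate the attendees
def pvLex (a b : Int × Int) : Prop := a.1 < b.1 ∨ (a.1 = b.1 ∧ a.2 < b.2)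

-- the attendee (index, rank) entries, in index order
def pvF (rank : List Int) (attendance : List Bool) : List (Int × Int) :=
  (PySem.List.enumerate rank).filter
    (fun p => decide ((attendance.length : Int) ≤ p.1) || PySem.List.pyGetD attendance p.1 false)

lemma pvInsertBy_cons {α : Type} (bef : α → α → Bool) (x y : α) (ys : List α) :
    PySem.List.insertBy bef x (y :: ys) =
      if bef x y then x :: y :: ys else y :: PySem.List.insertBy bef x ys := rfl

lemma pvInsertBy_middle {α : Type} (bef : α → α → Bool) (x : α) :
    ∀ (u v : List α), (∀ a ∈ u, bef x a = false) → (∀ b ∈ v, bef x b = true) →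
      PySem.List.insertBy bef x (u ++ v) = u ++ x :: v := by
  intro u
  induction u with
  | nil =>
    intro v hu hv
    cases v with
    | nil => rfl
    | cons b v' => simp [pvInsertBy_cons, hv b (List.mem_cons_self)]
  | cons a u' ih =>
    intro v hu hv
    have ha : bef x a = false := hu a (List.mem_cons_self)
    simp only [List.cons_append, pvInsertBy_cons, ha, Bool.false_eq_true, if_false]
    rw [ih v (fun a' ha' => hu a' (List.mem_cons_of_mem _ ha')) hv]

-- a stable sort by key `k` of a list whose tie-break values `f` are strictly increasing equals the
-- unique rearrangement ordered strictly by (k, f)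
lemma pvStableSorted {α κ : Type} [LT κ] [DecidableLT κ]
    (hasym : ∀ u v : κ, u < v → ¬ v < u) (hirr : ∀ u : κ, ¬ u < u)
    (k : α → κ) (f : α → Int) (xs : List α) :
    ∀ ys : List α, ys.Perm xs →
      xs.Pairwise (fun a b => f a < f b) →
      ys.Pairwise (fun a b => k a < k b ∨ (k a = k b ∧ f a < f b)) →
      PySem.List.sorted xs k false = ys := by
  induction xs using List.reverseRecOn with
  | nil =>
    intro ys hperm _ _
    rw [List.Perm.eq_nil hperm]
    rfl
  | append_singleton xs x ih =>
    intro ys hperm hxs hys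
    have hx_mem : x ∈ ys := hperm.mem_iff.mpr (by simp)
    obtain ⟨u, v, rfl⟩ := List.append_of_mem hx_mem
    have hperm' : (u ++ v).Perm xs := by
      have h1 : (x :: (u ++ v)).Perm (x :: xs) :=
        (List.perm_middle.symm.trans hperm).trans List.perm_append_comm
      exact h1.cons_inv
    obtain ⟨hxs1, _, hcrossx⟩ := List.pairwise_append.mp hxs
    obtain ⟨hu_pw, hxv_pw, hcross⟩ := List.pairwise_append.mp hys
    obtain ⟨hx_v, hv_pw⟩ := List.pairwise_cons.mp hxv_pw
    have hys' : (u ++ v).Pairwise (fun a b => k a < k b ∨ (k a = k b ∧ f a < f b)) :=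
      List.pairwise_append.mpr ⟨hu_pw, hv_pw,
        fun a ha b hb => hcross a ha b (List.mem_cons_of_mem _ hb)⟩
    have h0 : PySem.List.sorted xs k false = u ++ v := ih (u ++ v) hperm' hxs1 hys'
    have hstep : PySem.List.sorted (xs ++ [x]) k false =
        PySem.List.insertBy (fun a b => decide (k a < k b)) x (PySem.List.sorted xs k false) := by
      rw [PySem.List.sorted_eq_foldl_insertBy, List.foldl_append,
        ← PySem.List.sorted_eq_foldl_insertBy]
      rfl
    rw [hstep, h0]
    apply pvInsertBy_middle
    · intro a ha
      have hax := hcross a ha x (List.mem_cons_self)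
      rcases hax with h | ⟨h, _⟩
      · exact decide_eq_false (hasym _ _ h)
      · exact decide_eq_false (by rw [h]; exact hirr _)
    · intro b hb
      have hxb := hx_v b hb
      rcases hxb with h | ⟨_, h2⟩
      · exact decide_eq_true h
      · exfalso
        have hbxs : b ∈ xs := hperm'.mem_iff.mp (List.mem_append_right u hb)
        have := hcrossx b hbxs x (List.mem_cons_self)
        omega

lemma pvListIntAsymm : ∀ u v : List Int, u < v → ¬ v < u := by
  intro u v h
  rw [show ((u < v) = List.lt u v) from rfl, List.lt_iff_lex_lt] at h
  rw [show ((v < u) = List.lt v u) from rfl, List.lt_iff_lex_lt]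
  exact asymm h

lemma pvListIntIrrefl : ∀ u : List Int, ¬ u < u := by
  intro u
  rw [show ((u < u) = List.lt u u) from rfl, List.lt_iff_lex_lt]
  exact irrefl _

lemma pvSingletonLt (a b : Int) (h : a < b) : ([a] : List Int) < [b] := by
  rw [show (([a] : List Int) < [b]) = List.lt [a] [b] from rfl, List.lt_iff_lex_lt]
  exact List.Lex.rel h

-- min2?'s fold step, named so that the fold can be reasoned about with a varying accumulator
def pvMinStep (acc : Option (Int × Int)) (x : Int × Int) : Option (Int × Int) :=
  match acc with
  | none => some x
  | some m =>
    if decide (x.1 < m.1) || (!decide (m.1 < x.1) && decide (x.2 < m.2)) then some x else some m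

lemma pvMinStep_some (c a : Int × Int) :
    pvMinStep (some c) a =
      if decide (a.1 < c.1) || (!decide (c.1 < a.1) && decide (a.2 < c.2)) then some a else some c :=
  rfl

lemma pvMin2Unfold (l : List (Int × Int)) :
    PySem.List.min2? l (fun x => x.1) (fun x => x.2) = l.foldl pvMinStep none := by
  unfold PySem.List.min2?
  congr 1
  funext acc x
  cases acc <;> rfl

lemma pvMinStep_keep (m y : Int × Int) (h : y = m ∨ pvLex m y) : pvMinStep (some m) y = some m := by
  have hc : (decide (y.1 < m.1) || (!decide (m.1 < y.1) && decide (y.2 < m.2))) = false := by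
    simp only [Bool.or_eq_false_iff, Bool.and_eq_false_iff, decide_eq_false_iff_not,
      Bool.not_eq_false', decide_eq_true_eq]
    rcases h with rfl | h | ⟨h1, h2⟩ <;> constructor <;> omega
  simp [pvMinStep, hc]

lemma pvMinStep_take (m c : Int × Int) (h : pvLex m c) : pvMinStep (some c) m = some m := by
  have hc : (decide (m.1 < c.1) || (!decide (c.1 < m.1) && decide (m.2 < c.2))) = true := by
    simp only [Bool.or_eq_true, Bool.and_eq_true, decide_eq_true_eq, Bool.not_eq_true',
      decide_eq_false_iff_not]
    rcases h with h | ⟨h1, h2⟩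
    · left; exact h
    · right; exact ⟨by omega, h2⟩
  simp [pvMinStep, hc]

lemma pvMinFold_keep : ∀ (l : List (Int × Int)) (m : Int × Int),
    (∀ y ∈ l, y = m ∨ pvLex m y) → l.foldl pvMinStep (some m) = some m := by
  intro l
  induction l with
  | nil => intro m _; rfl
  | cons a l ih =>
    intro m h
    rw [List.foldl_cons, pvMinStep_keep m a (h a (List.mem_cons_self))]
    exact ih m (fun y hy => h y (List.mem_cons_of_mem _ hy))

lemma pvMinFold_find : ∀ (l : List (Int × Int)) (c m : Int × Int), m ∈ l → pvLex m c →
    (∀ y ∈ l, y = m ∨ pvLex m y) → l.foldl pvMinStep (some c) = some m := by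
  intro l
  induction l with
  | nil => intro c m hm; exact absurd hm (List.not_mem_nil)
  | cons a l ih =>
    intro c m hm hmc h
    by_cases ham : a = m
    · subst ham
      rw [List.foldl_cons, pvMinStep_take a c hmc]
      exact pvMinFold_keep l a (fun y hy => h y (List.mem_cons_of_mem _ hy))
    · have hml : m ∈ l := by
        rcases List.mem_cons.mp hm with h' | h'
        · exact absurd h'.symm ham
        · exact h'
      have hma : pvLex m a := by
        rcases h a (List.mem_cons_self) with h' | h'
        · exact absurd h' ham
        · exact h'
      have h' : ∀ y ∈ l, y = m ∨ pvLex m y := fun y hy => h y (List.mem_cons_of_mem _ hy)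
      have hcases : pvMinStep (some c) a = some a ∨ pvMinStep (some c) a = some c := by
        rw [pvMinStep_some]
        split
        · exact Or.inl rfl
        · exact Or.inr rfl
      rcases hcases with hc' | hc' <;> rw [List.foldl_cons, hc']
      · exact ih a m hml hma h'
      · exact ih c m hml hmc h'

lemma pvMinAt (P : List (Int × Int)) (m : Int × Int) (hm : m ∈ P)
    (h : ∀ y ∈ P, y = m ∨ pvLex m y) :
    PySem.List.min2? P (fun x => x.1) (fun x => x.2) = some m := by
  rw [pvMin2Unfold]
  cases P with
  | nil => exact absurd hm (List.not_mem_nil)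
  | cons a l =>
    rw [List.foldl_cons, show pvMinStep none a = some a from rfl]
    by_cases ham : a = m
    · subst ham
      exact pvMinFold_keep l a (fun y hy => h y (List.mem_cons_of_mem _ hy))
    · have hml : m ∈ l := by
        rcases List.mem_cons.mp hm with h' | h'
        · exact absurd h' (fun e => ham e.symm)
        · exact h'
      have hma : pvLex m a := by
        rcases h a (List.mem_cons_self) with h' | h'
        · exact absurd h' ham
        · exact h'
      exact pvMinFold_find l a m hml hma (fun y hy => h y (List.mem_cons_of_mem _ hy))

-- the delete-loop of A: erasing every False index filters the items list
lemma pvEraseLoop (att : List Bool) : ∀ (is : List Int) (d : PySem.Dict Int (List Int)),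
    (is.foldl (fun g i => if PySem.List.pyGetD att i true == false then g.erase i else g) d).items
    = d.items.filter
        (fun p => !(is.any (fun i => (PySem.List.pyGetD att i true == false) && p.1 == i))) := by
  intro is
  induction is with
  | nil => intro d; simp
  | cons i is ih =>
    intro d
    rw [List.foldl_cons]
    cases hc : PySem.List.pyGetD att i true == false
    · simp only [Bool.false_eq_true, if_false]
      rw [ih d]
      apply List.filter_congr
      intro p _
      rw [List.any_cons, hc, Bool.false_and, Bool.false_or]
    · simp only [if_true]
      rw [ih (d.erase i),
        show (d.erase i).items = d.items.filter (fun p => !(p.1 == i)) from rfl,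
        List.filter_filter]
      apply List.filter_congr
      intro p _
      rw [List.any_cons, hc, Bool.true_and]
      cases hpi : p.1 == i <;> cases hany : is.any
          (fun i' => (PySem.List.pyGetD att i' true == false) && p.1 == i') <;> rfl

-- the per-entry predicate of the delete-loop agrees with B's comprehension condition
lemma pvKeepEq (rank : List Int) (att : List Bool) (p : Int × Int)
    (hp : p ∈ PySem.List.enumerate rank) :
    (!((PySem.List.pyRange 0 (att.length : Int) 1).any
        (fun i => (PySem.List.pyGetD att i true == false) && p.1 == i)))
    = (decide ((att.length : Int) ≤ p.1) || PySem.List.pyGetD att p.1 false) := by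
  obtain ⟨k, hk, hpk⟩ := (PySem.List.mem_enumerate_iff rank 0 p).mp hp
  have hp1 : p.1 = (k : Int) := by rw [hpk]; simp
  by_cases hlt : (k : Int) < (att.length : Int)
  · have hkN : k < att.length := by exact_mod_cast hlt
    have hgT : PySem.List.pyGetD att p.1 true = att[k] := by
      rw [hp1, PySem.List.pyGetD_natCast, List.getD_eq_getElem att true hkN]
    have hgF : PySem.List.pyGetD att p.1 false = att[k] := by
      rw [hp1, PySem.List.pyGetD_natCast, List.getD_eq_getElem att false hkN]
    cases hval : att[k]
    · have hany : ((PySem.List.pyRange 0 (att.length : Int) 1).any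
          (fun i => (PySem.List.pyGetD att i true == false) && p.1 == i)) = true := by
        rw [List.any_eq_true]
        refine ⟨p.1, ?_, ?_⟩
        · rw [hp1]; exact PySem.List.mem_pyRange_one.mpr ⟨by positivity, hlt⟩
        · rw [hgT, hval]; simp
      rw [hany, hgF, hval]
      simp [show ¬ ((att.length : Int) ≤ p.1) by omega]
    · have hany : ((PySem.List.pyRange 0 (att.length : Int) 1).any
          (fun i => (PySem.List.pyGetD att i true == false) && p.1 == i)) = false := by
        rw [List.any_eq_false]
        intro i hi
        by_cases hik : p.1 = i
        · subst hik
          rw [hgT, hval]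
          simp
        · simp [hik]
      rw [hany, hgF, hval]
      simp
  · have hany : ((PySem.List.pyRange 0 (att.length : Int) 1).any
        (fun i => (PySem.List.pyGetD att i true == false) && p.1 == i)) = false := by
      rw [List.any_eq_false]
      intro i hi
      have := PySem.List.mem_pyRange_one.mp hi
      have : ¬ (p.1 = i) := by omega
      simp [this]
    rw [hany]
    simp [show (att.length : Int) ≤ p.1 by omega]

-- the final dict of A lists exactly the attendee entries, each with its singleton value
lemma pvGroupItems (rank : List Int) (att : List Bool) :
    ((PySem.List.pyRange 0 (att.length : Int) 1).foldl
        (fun g i => if PySem.List.pyGetD att i true == false then g.erase i else g)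
        ((PySem.List.enumerate rank).foldl (fun g p => g.insert p.1 [p.2])
          (PySem.Dict.empty : PySem.Dict Int (List Int)))).items
    = (pvF rank att).map (fun p => (p.1, ([p.2] : List Int))) := by
  rw [pvEraseLoop]
  have hfresh : ∀ a ∈ PySem.List.enumerate rank,
      (PySem.Dict.empty : PySem.Dict Int (List Int)).contains a.1 = false := by
    intro a _; exact PySem.Dict.contains_empty _
  have hnodup : ((PySem.List.enumerate rank).map (fun p => p.1)).Nodup := by
    rw [PySem.List.map_fst_enumerate]
    exact PySem.List.nodup_pyRange_one _ _
  rw [PySem.Dict.items_foldl_insert_fresh (PySem.List.enumerate rank)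
      (fun p => p.1) (fun p => [p.2]) PySem.Dict.empty hfresh hnodup]
  rw [show (PySem.Dict.empty : PySem.Dict Int (List Int)).items = [] from rfl, List.nil_append,
    List.filter_map]
  unfold pvF
  congr 1
  apply List.filter_congr
  intro p hp
  exact pvKeepEq rank att p hp

-- key comparison (r*N + i with 0 ≤ i < N) reflects the lexicographic pair order
lemma pvKeyLex (N : Int) (a b : Int × Int) (h2a : 0 ≤ a.2) (haN : a.2 < N)
    (hbN : b.2 < N) (hk : a.1 * N + a.2 ≤ b.1 * N + b.2)
    (hne : a.2 ≠ b.2) : pvLex a b := by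
  rcases lt_trichotomy a.1 b.1 with h | h | h
  · exact Or.inl h
  · refine Or.inr ⟨h, ?_⟩
    rw [h] at hk
    omega
  · exfalso
    have h1 : (b.1 + 1) * N ≤ a.1 * N :=
      mul_le_mul_of_nonneg_right (by omega) (by omega)
    nlinarith

lemma pvThree {α : Type} (l : List α) (h : 3 ≤ l.length) :
    ∃ a b c t, l = a :: b :: c :: t := by
  rcases l with _ | ⟨a, _ | ⟨b, _ | ⟨c, t⟩⟩⟩
  · simp at h
  · simp at h
  · simp at h
  · exact ⟨a, b, c, t, rfl⟩

lemma pvGet0 {α : Type} (x0 : α) (l : List α) : PySem.List.pyGet? (x0 :: l) 0 = some x0 := by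
  rw [show (0 : Int) = ((0 : Nat) : Int) from rfl, PySem.List.pyGet?_natCast]
  rfl

lemma pvGet1 {α : Type} (x0 x1 : α) (l : List α) :
    PySem.List.pyGet? (x0 :: x1 :: l) 1 = some x1 := by
  rw [show (1 : Int) = ((1 : Nat) : Int) from rfl, PySem.List.pyGet?_natCast]
  rfl

lemma pvGet2 {α : Type} (x0 x1 x2 : α) (l : List α) :
    PySem.List.pyGet? (x0 :: x1 :: x2 :: l) 2 = some x2 := by
  rw [show (2 : Int) = ((2 : Nat) : Int) from rfl, PySem.List.pyGet?_natCast]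
  rfl

-- ===== VERDICT (by name: the statement is the Claim_ definition above) =====
theorem solution_spec : Claim_equal_solution := by
  intro rank att hdom hpre
  obtain ⟨hpre1, hpre3⟩ := hpre
  show solution rank att = solution_alt rank att
  -- the attendee pair list in B's order, and its strictly (rank, index)-sorted rearrangement
  set P : List (Int × Int) := (pvF rank att).map (fun p => (p.2, p.1)) with hPdef
  set N : Int := (rank.length : Int) + 1 with hNdef
  set T : List (Int × Int) := PySem.List.sorted P (fun q => q.1 * N + q.2) false with hTdef
  -- basic facts about the attendee list
  have hF1 : (pvF rank att).Pairwise (fun a b => a.1 < b.1) :=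
    List.Pairwise.sublist List.filter_sublist (PySem.List.pairwise_lt_enumerate rank 0)
  have hFmem : ∀ p ∈ pvF rank att, 0 ≤ p.1 ∧ p.1 < (rank.length : Int) := by
    intro p hp
    obtain ⟨k, hk, rfl⟩ := (PySem.List.mem_enumerate_iff rank 0 p).mp (List.mem_of_mem_filter hp)
    constructor
    · simp
    · simp
      omega
  have hlenF : 3 ≤ (pvF rank att).length := by
    have he := PySem.List.enumerate_eq_map_pyRange rank 0
    unfold pvF
    rw [he, List.filter_map, List.length_map]
    exact le_of_le_of_eq hpre3 (congrArg List.length (List.filter_congr (fun j _ => rfl)))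
  -- facts about the sorted rearrangement T
  have hPT : T.Perm P := PySem.List.sorted_perm P (fun q => q.1 * N + q.2) false
  have hTle : T.Pairwise (fun a b => a.1 * N + a.2 ≤ b.1 * N + b.2) :=
    PySem.List.sorted_pairwise P (fun q => q.1 * N + q.2)
  have hPne : P.Pairwise (fun a b => a.2 ≠ b.2) :=
    List.pairwise_map.mpr (hF1.imp (fun h => ne_of_lt h))
  have hTne : T.Pairwise (fun a b => a.2 ≠ b.2) :=
    (hPT.pairwise_iff (fun h e => h e.symm)).mpr hPne
  have hTmem : ∀ q ∈ T, 0 ≤ q.2 ∧ q.2 < N := by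
    intro q hq
    obtain ⟨p, hpF, rfl⟩ := List.mem_map.mp (hPT.mem_iff.mp hq)
    have := hFmem p hpF
    constructor <;> simp <;> omega
  have hTlex : T.Pairwise pvLex := by
    refine List.Pairwise.imp_of_mem ?_ (hTle.and hTne)
    intro a b ha hb hab
    exact pvKeyLex N a b (hTmem a ha).1 (hTmem a ha).2 (hTmem b hb).2 hab.1 hab.2
  -- T has at least three entries
  have hlenT : 3 ≤ T.length := by
    rw [hPT.length_eq, hPdef, List.length_map]
    exact hlenF
  obtain ⟨t1, t2, t3, rest, hTeq⟩ := pvThree T hlenT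
  have hTlex' : (t1 :: t2 :: t3 :: rest).Pairwise pvLex := hTeq ▸ hTlex
  -- A's sorted items list is T, entry by entry
  have hA_sorted : PySem.List.sorted ((pvF rank att).map (fun p => (p.1, ([p.2] : List Int))))
      (fun x => x.2) false = T.map (fun q => (q.2, ([q.1] : List Int))) := by
    apply pvStableSorted pvListIntAsymm pvListIntIrrefl (fun x : Int × List Int => x.2) (fun x : Int × List Int => x.1)
    · have h1 : T.map (fun q : Int × Int => (q.2, ([q.1] : List Int))) |>.Perm
          (P.map (fun q : Int × Int => (q.2, ([q.1] : List Int)))) :=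
        hPT.map _
      have h2 : P.map (fun q : Int × Int => (q.2, ([q.1] : List Int)))
          = (pvF rank att).map (fun p => (p.1, ([p.2] : List Int))) := by
        rw [hPdef, List.map_map]
        rfl
      rw [h2] at h1
      exact h1
    · exact List.pairwise_map.mpr hF1
    · refine List.pairwise_map.mpr (hTlex.imp ?_)
      intro a b h
      rcases h with h1 | ⟨he, h2⟩
      · exact Or.inl (pvSingletonLt _ _ h1)
      · exact Or.inr ⟨by rw [he], h2⟩
  -- extraction facts for B's three minima
  have hmem1 : t1 ∈ P := hPT.mem_iff.mp (by rw [hTeq]; exact List.mem_cons_self)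
  have hall1 : ∀ y ∈ P, y = t1 ∨ pvLex t1 y := by
    intro y hy
    have hyT : y ∈ t1 :: t2 :: t3 :: rest := by rw [← hTeq]; exact hPT.mem_iff.mpr hy
    rcases List.mem_cons.mp hyT with h | h
    · exact Or.inl h
    · exact Or.inr (List.rel_of_pairwise_cons hTlex' h)
  have hmin1 : PySem.List.min2? P (fun x => x.1) (fun x => x.2) = some t1 :=
    pvMinAt P t1 hmem1 hall1
  have hrem1 : PySem.List.remove? P t1 = some (P.erase t1) :=
    PySem.List.remove?_eq_some_erase P t1 hmem1
  have hperm1 : (P.erase t1).Perm (t2 :: t3 :: rest) := by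
    have h := List.Perm.erase t1 hPT.symm
    rwa [hTeq, List.erase_cons_head] at h
  have htail1 : (t2 :: t3 :: rest).Pairwise pvLex := hTlex'.of_cons
  have hmem2 : t2 ∈ P.erase t1 := hperm1.mem_iff.mpr List.mem_cons_self
  have hall2 : ∀ y ∈ P.erase t1, y = t2 ∨ pvLex t2 y := by
    intro y hy
    rcases List.mem_cons.mp (hperm1.mem_iff.mp hy) with h | h
    · exact Or.inl h
    · exact Or.inr (List.rel_of_pairwise_cons htail1 h)
  have hmin2 : PySem.List.min2? (P.erase t1) (fun x => x.1) (fun x => x.2) = some t2 :=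
    pvMinAt _ t2 hmem2 hall2
  have hrem2 : PySem.List.remove? (P.erase t1) t2 = some ((P.erase t1).erase t2) :=
    PySem.List.remove?_eq_some_erase _ t2 hmem2
  have hperm2 : ((P.erase t1).erase t2).Perm (t3 :: rest) := by
    have h := List.Perm.erase t2 hperm1
    rwa [List.erase_cons_head] at h
  have htail2 : (t3 :: rest).Pairwise pvLex := htail1.of_cons
  have hmem3 : t3 ∈ (P.erase t1).erase t2 := hperm2.mem_iff.mpr List.mem_cons_self
  have hall3 : ∀ y ∈ (P.erase t1).erase t2, y = t3 ∨ pvLex t3 y := by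
    intro y hy
    rcases List.mem_cons.mp (hperm2.mem_iff.mp hy) with h | h
    · exact Or.inl h
    · exact Or.inr (List.rel_of_pairwise_cons htail2 h)
  have hmin3 : PySem.List.min2? ((P.erase t1).erase t2) (fun x => x.1) (fun x => x.2) = some t3 :=
    pvMinAt _ t3 hmem3 hall3
  have hrem3 : PySem.List.remove? ((P.erase t1).erase t2) t3
      = some (((P.erase t1).erase t2).erase t3) :=
    PySem.List.remove?_eq_some_erase _ t3 hmem3
  -- evaluate A
  have hA : solution rank att = 10000 * t1.2 + 100 * t2.2 + t3.2 := by
    simp only [solution]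
    rw [pvGroupItems rank att, hA_sorted, hTeq, List.map_cons, List.map_cons, List.map_cons,
      pvGet0, pvGet1, pvGet2]
  -- evaluate B
  have hB : solution_alt rank att = 10000 * t1.2 + 100 * t2.2 + t3.2 := by
    simp only [solution_alt]
    rw [show ((PySem.List.enumerate rank).filter
        (fun p => decide ((att.length : Int) ≤ p.1) || PySem.List.pyGetD att p.1 false)).map
        (fun p => (p.2, p.1)) = P from rfl]
    simp only [List.foldl_cons, List.foldl_nil, hmin1, hrem1, hmin2, hrem2, hmin3, hrem3]
    ring
  rw [hA, hB]
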